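-- pv_equiv track=rewrite | github.com/Aayus-247/placement-analyzer | backend/analyzer.py | suggest_projects
-- ===== SOURCE A (Python) =====
-- def suggest_projects(jd_text):
--     jd = jd_text.lower()
--
--     if any(word in jd for word in ["data", "analyst", "machine learning"]):
--         return [
--             "Sales forecasting dashboard using Python and Power BI",
--             "Resume-job matching system using NLP",
--             "Customer churn prediction project"
--         ]
--     if any(word in jd for word in ["frontend", "react", "web"]):
--         return [
--             "Portfolio website with animations and theme switcher",
--             "Admin dashboard with charts and authentication",
--             "E-commerce frontend with cart and filtering"
--         ]
--     if any(word in jd for word in ["backend", "api", "node", "database"]):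
--         return [
--             "Authentication API with JWT",
--             "Job portal backend with database",
--             "Complaint management system with REST APIs"
--         ]
--     if any(word in jd for word in ["sales", "marketing"]):
--         return [
--             "Lead management CRM mini project",
--             "Customer segmentation dashboard",
--             "Sales performance analytics tool"
--         ]
--
--     return [
--         "Role-specific project aligned with the target job",
--         "End-to-end project with measurable results",
--         "Project demonstrating problem-solving and business value"
--     ]
-- ===== SOURCE B (Python) =====
-- # Flat keyword->group-index scoring: collect all matched group indices in one
-- # pass, pick the minimum (= highest-precedence) matched group, index a table.
-- KEYWORD_GROUPS = [
--     ("data", 0), ("analyst", 0), ("machine learning", 0),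
--     ("frontend", 1), ("react", 1), ("web", 1),
--     ("backend", 2), ("api", 2), ("node", 2), ("database", 2),
--     ("sales", 3), ("marketing", 3),
-- ]
--
-- PROJECTS = [
--     [
--         "Sales forecasting dashboard using Python and Power BI",
--         "Resume-job matching system using NLP",
--         "Customer churn prediction project",
--     ],
--     [
--         "Portfolio website with animations and theme switcher",
--         "Admin dashboard with charts and authentication",
--         "E-commerce frontend with cart and filtering",
--     ],
--     [
--         "Authentication API with JWT",
--         "Job portal backend with database",
--         "Complaint management system with REST APIs",
--     ],
--     [
--         "Lead management CRM mini project",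
--         "Customer segmentation dashboard",
--         "Sales performance analytics tool",
--     ],
--     [
--         "Role-specific project aligned with the target job",
--         "End-to-end project with measurable results",
--         "Project demonstrating problem-solving and business value",
--     ],
-- ]
--
--
-- def suggest_projects(jd_text):
--     jd = jd_text.lower()
--     best = min((g for w, g in KEYWORD_GROUPS if w in jd), default=4)
--     return PROJECTS[best]
-- ===== Notes on version B (the rewrite author's own statement) =====
-- stated objective: alternative
-- what changed: Instead of testing keyword groups one branch at a time, B flattens all keywords into one (keyword, group-index) list, collects every matched group index in a single pass, and returns PROJECTS[min(matched, default=4)] — precedence becomes arithmetic (minimum index) instead of control flow.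
import Mathlib
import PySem

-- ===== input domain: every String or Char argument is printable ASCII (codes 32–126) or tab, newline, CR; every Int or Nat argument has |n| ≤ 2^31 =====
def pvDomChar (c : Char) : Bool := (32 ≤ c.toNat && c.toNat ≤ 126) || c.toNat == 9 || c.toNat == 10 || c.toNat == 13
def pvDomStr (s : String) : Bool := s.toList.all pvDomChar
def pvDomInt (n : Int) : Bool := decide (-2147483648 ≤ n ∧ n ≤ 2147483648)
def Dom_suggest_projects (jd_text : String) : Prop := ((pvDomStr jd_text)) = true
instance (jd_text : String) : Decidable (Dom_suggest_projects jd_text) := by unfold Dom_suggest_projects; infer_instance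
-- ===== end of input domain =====

-- B replaces A's if/return chain by a flat keyword→group-index list: one pass collects all
-- matched group indices, the minimum (default 4) indexes a projects table (alternative, same cost).

-- ===== PORT A =====
def suggest_projects (jd_text : String) : List String :=
  let jd := PySem.Str.lower jd_text
  if (["data", "analyst", "machine learning"].any (fun word => PySem.Str.isIn word jd)) then
    [ "Sales forecasting dashboard using Python and Power BI",
      "Resume-job matching system using NLP",
      "Customer churn prediction project" ]
  else if (["frontend", "react", "web"].any (fun word => PySem.Str.isIn word jd)) then
    [ "Portfolio website with animations and theme switcher",
      "Admin dashboard with charts and authentication",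
      "E-commerce frontend with cart and filtering" ]
  else if (["backend", "api", "node", "database"].any (fun word => PySem.Str.isIn word jd)) then
    [ "Authentication API with JWT",
      "Job portal backend with database",
      "Complaint management system with REST APIs" ]
  else if (["sales", "marketing"].any (fun word => PySem.Str.isIn word jd)) then
    [ "Lead management CRM mini project",
      "Customer segmentation dashboard",
      "Sales performance analytics tool" ]
  else
    [ "Role-specific project aligned with the target job",
      "End-to-end project with measurable results",
      "Project demonstrating problem-solving and business value" ]

-- ===== PORT B =====
def pvKeywordGroups : List (String × Int) :=
  [ ("data", 0), ("analyst", 0), ("machine learning", 0),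
    ("frontend", 1), ("react", 1), ("web", 1),
    ("backend", 2), ("api", 2), ("node", 2), ("database", 2),
    ("sales", 3), ("marketing", 3) ]

def pvProjects : List (List String) :=
  [ [ "Sales forecasting dashboard using Python and Power BI",
      "Resume-job matching system using NLP",
      "Customer churn prediction project" ],
    [ "Portfolio website with animations and theme switcher",
      "Admin dashboard with charts and authentication",
      "E-commerce frontend with cart and filtering" ],
    [ "Authentication API with JWT",
      "Job portal backend with database",
      "Complaint management system with REST APIs" ],
    [ "Lead management CRM mini project",
      "Customer segmentation dashboard",
      "Sales performance analytics tool" ],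
    [ "Role-specific project aligned with the target job",
      "End-to-end project with measurable results",
      "Project demonstrating problem-solving and business value" ] ]

def suggest_projects_alt (jd_text : String) : List String :=
  let jd := PySem.Str.lower jd_text
  -- min((g for w, g in KEYWORD_GROUPS if w in jd), default=4)
  let best : Int :=
    (PySem.List.min? (pvKeywordGroups.filterMap
      (fun wg => if PySem.Str.isIn wg.1 jd then some wg.2 else none)) (fun x => x)).getD 4
  -- PROJECTS[best]; 0 ≤ best ≤ 4 always, so the none arm is unreachable
  (PySem.List.pyGet? pvProjects best).getD []

-- ===== PRECONDITION & SPEC =====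
def Spec_suggest_projects (jd_text : String) (out : List String) : Prop := out = suggest_projects_alt jd_text
instance (jd_text : String) (out : List String) : Decidable (Spec_suggest_projects jd_text out) := by unfold Spec_suggest_projects; infer_instance

-- ===== CLAIM (what is proved, stated in full; the proofs are below) =====
def Claim_equal_suggest_projects : Prop := ∀ (jd_text : String), Dom_suggest_projects jd_text → Spec_suggest_projects jd_text (suggest_projects jd_text)

-- ===== LEMMAS AND PROOFS =====

-- A's if/return chain, as one table lookup on the branch index
lemma pvA_idx (b1 b2 b3 b4 : Bool) :
    (if b1 then
      [ "Sales forecasting dashboard using Python and Power BI",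
        "Resume-job matching system using NLP",
        "Customer churn prediction project" ]
    else if b2 then
      [ "Portfolio website with animations and theme switcher",
        "Admin dashboard with charts and authentication",
        "E-commerce frontend with cart and filtering" ]
    else if b3 then
      [ "Authentication API with JWT",
        "Job portal backend with database",
        "Complaint management system with REST APIs" ]
    else if b4 then
      [ "Lead management CRM mini project",
        "Customer segmentation dashboard",
        "Sales performance analytics tool" ]
    else
      [ "Role-specific project aligned with the target job",
        "End-to-end project with measurable results",
        "Project demonstrating problem-solving and business value" ]) =
    (PySem.List.pyGet? pvProjects
      (if b1 then (0:Int) else if b2 then 1 else if b3 then 2 else if b4 then 3 else 4)).getD [] := by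
  cases b1 <;> cases b2 <;> cases b3 <;> cases b4 <;> rfl

-- filterMap as option-toList concatenation (no term duplication, unlike filterMap_cons)
lemma pv_fm_cons {α β : Type} (f : α → Option β) (a : α) (l : List α) :
    List.filterMap f (a :: l) = (f a).toList ++ List.filterMap f l := by
  cases h : f a <;> simp [h]

-- core fact on the 12 keyword-hit booleans: A's branch index = min matched group index
lemma pvIdx12 (c1 c2 c3 c4 c5 c6 c7 c8 c9 c10 c11 c12 : Bool) :
    (if (c1 || (c2 || (c3 || false))) then (0:Int)
     else if (c4 || (c5 || (c6 || false))) then 1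
     else if (c7 || (c8 || (c9 || (c10 || false)))) then 2
     else if (c11 || (c12 || false)) then 3
     else 4) =
    (PySem.List.min?
      ((if c1 then some (0:Int) else none).toList ++ ((if c2 then some (0:Int) else none).toList ++
       ((if c3 then some (0:Int) else none).toList ++ ((if c4 then some (1:Int) else none).toList ++
       ((if c5 then some (1:Int) else none).toList ++ ((if c6 then some (1:Int) else none).toList ++
       ((if c7 then some (2:Int) else none).toList ++ ((if c8 then some (2:Int) else none).toList ++
       ((if c9 then some (2:Int) else none).toList ++ ((if c10 then some (2:Int) else none).toList ++
       ((if c11 then some (3:Int) else none).toList ++ ((if c12 then some (3:Int) else none).toList ++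
       ([] : List Int)))))))))))))
      (fun x => x)).getD 4 := by
  revert c1 c2 c3 c4 c5 c6 c7 c8 c9 c10 c11 c12
  decide

-- the branch index of A's chain equals the minimum matched group index of B
lemma pvIdx (p : String → Bool) :
    (if (["data", "analyst", "machine learning"].any p) then (0:Int)
     else if (["frontend", "react", "web"].any p) then 1
     else if (["backend", "api", "node", "database"].any p) then 2
     else if (["sales", "marketing"].any p) then 3
     else 4) =
    (PySem.List.min? (pvKeywordGroups.filterMap
      (fun wg => if p wg.1 then some wg.2 else none)) (fun x => x)).getD 4 := by
  simp only [pvKeywordGroups, pv_fm_cons, List.filterMap_nil,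
    List.any_cons, List.any_nil]
  exact pvIdx12 (p "data") (p "analyst") (p "machine learning") (p "frontend") (p "react")
    (p "web") (p "backend") (p "api") (p "node") (p "database") (p "sales") (p "marketing")

theorem pv_main (jd_text : String) :
    suggest_projects jd_text = suggest_projects_alt jd_text := by
  unfold suggest_projects suggest_projects_alt
  rw [pvA_idx]
  exact congrArg (fun i => (PySem.List.pyGet? pvProjects i).getD [])
    (pvIdx (fun word => PySem.Str.isIn word (PySem.Str.lower jd_text)))

-- ===== VERDICT (by name: the statement is the Claim_ definition above) =====
theorem suggest_projects_spec : Claim_equal_suggest_projects := by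
  intro jd_text _
  show suggest_projects jd_text = suggest_projects_alt jd_text
  exact pv_main jd_text
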